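-- pv_equiv track=rewrite | github.com/rohantib/lcs-suffix | filelcsSuffix.py | build_type_map
-- ===== SOURCE A (Python) =====
-- def build_type_map(string):
--     """ Returns boolean array for each index of string (including empty suffix) - True for if it is S-Type, False for L-Type """
--     is_S_typemap = [False] * (len(string) + 1)
--
--     is_S_typemap[-1] = True
--     if len(string) == 0:
--         return is_S_typemap
--
--     for i in range(len(string)-2, -1, -1):
--         if string[i] < string[i+1] or (string[i] == string[i+1] and is_S_typemap[i+1]):
--             is_S_typemap[i] = True
--
--     return is_S_typemap
-- ===== SOURCE B (Python) =====
-- def build_type_map(string):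
--     """ Returns boolean array for each index of string (including empty suffix) - True for if it is S-Type, False for L-Type """
--     return [string[i:] < string[i + 1:] for i in range(len(string))] + [True]
-- ===== Notes on version B (the rewrite author's own statement) =====
-- stated objective: simpler
-- what changed: Replaced the right-to-left DP over a preallocated mutable array by a direct list comprehension evaluating the lexicographic definition string[i:] < string[i+1:] for each index, plus the trailing True for the empty suffix.
import Mathlib
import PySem

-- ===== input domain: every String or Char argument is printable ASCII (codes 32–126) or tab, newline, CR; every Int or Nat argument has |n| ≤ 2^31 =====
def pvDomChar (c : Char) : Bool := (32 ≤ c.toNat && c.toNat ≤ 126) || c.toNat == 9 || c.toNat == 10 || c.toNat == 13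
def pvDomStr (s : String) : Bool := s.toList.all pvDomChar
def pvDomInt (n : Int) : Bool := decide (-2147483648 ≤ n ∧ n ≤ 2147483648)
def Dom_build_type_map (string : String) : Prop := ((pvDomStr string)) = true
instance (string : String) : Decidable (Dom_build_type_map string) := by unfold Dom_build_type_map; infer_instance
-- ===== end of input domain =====

-- B replaces A's right-to-left DP over a mutable array by a direct evaluation of the
-- lexicographic definition (suffix i < suffix i+1) per index; objective: simpler (not faster).


-- ===== PORT A =====
-- loop body of A's `for i in range(len(string)-2, -1, -1)`; string indexing is in range
-- on every access the loop makes, so pyGetD with a dummy default is exact there.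
def pvStep (cs : List Char) (a : List Bool) (i : Int) : List Bool :=
  if PySem.List.pyGetD cs i ' ' < PySem.List.pyGetD cs (i + 1) ' ' ∨
     (PySem.List.pyGetD cs i ' ' = PySem.List.pyGetD cs (i + 1) ' ' ∧
      PySem.List.pyGetD a (i + 1) false = true)
  then a.set i.toNat true else a

def build_type_map (string : String) : List Bool :=
  let cs := string.toList
  let n := cs.length
  let arr := List.replicate (n + 1) false
  let arr := arr.set (arr.length - 1) true   -- is_S_typemap[-1] = True (last element)
  if n = 0 then arr
  else (PySem.List.pyRange ((n : Int) - 2) (-1) (-1)).foldl (pvStep cs) arr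

-- ===== PORT B =====
-- Python's lexicographic `<` on strings (here applied to the two suffix slices)
def pvLexLt : List Char → List Char → Bool
  | _, [] => false
  | [], _ :: _ => true
  | a :: as, b :: bs => if a < b then true else if b < a then false else pvLexLt as bs

def build_type_map_alt (string : String) : List Bool :=
  let cs := string.toList
  -- string[i:] for 0 ≤ i is cs.drop i (exact)
  (List.range cs.length).map (fun i => pvLexLt (cs.drop i) (cs.drop (i + 1))) ++ [true]

-- ===== PRECONDITION & SPEC =====
def Spec_build_type_map (string : String) (out : List Bool) : Prop := out = build_type_map_alt string
instance (string : String) (out : List Bool) : Decidable (Spec_build_type_map string out) := by unfold Spec_build_type_map; infer_instance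

-- ===== CLAIM (what is proved, stated in full; the proofs are below) =====
def Claim_equal_build_type_map : Prop := ∀ (string : String), Dom_build_type_map string → Spec_build_type_map string (build_type_map string)

-- ===== LEMMAS AND PROOFS =====

def pvB (cs : List Char) (k : Nat) : Bool := pvLexLt (cs.drop k) (cs.drop (k + 1))

theorem pvLexLt_nil_right (xs : List Char) : pvLexLt xs [] = false := by
  cases xs <;> rfl

theorem pvB_last (cs : List Char) (h : k + 1 = cs.length) : pvB cs k = false := by
  simp [pvB, h, pvLexLt_nil_right]

theorem length_pvStep (cs : List Char) (a : List Bool) (i : Int) :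
    (pvStep cs a i).length = a.length := by
  unfold pvStep; split <;> simp

theorem length_foldl_pvStep (cs : List Char) (l : List Int) (a : List Bool) :
    (l.foldl (pvStep cs) a).length = a.length := by
  induction l generalizing a with
  | nil => rfl
  | cons i t ih => simp [List.foldl, ih, length_pvStep]

theorem pvB_cons (cs : List Char) (m : Nat) (h : m + 1 < cs.length) :
    pvB cs m = (if cs[m]'(by omega) < cs[m + 1] then true
                else if cs[m + 1]'h < cs[m]'(by omega) then false
                else pvB cs (m + 1)) := by
  have h1 : cs.drop m = cs[m]'(by omega) :: cs.drop (m + 1) :=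
    List.drop_eq_getElem_cons (by omega)
  have h2 : cs.drop (m + 1) = cs[m + 1]'h :: cs.drop (m + 2) :=
    List.drop_eq_getElem_cons h
  conv_lhs => rw [pvB, h1, h2]
  rw [pvLexLt]
  rw [pvB, ← h2]

theorem pvStep_eq (cs : List Char) (a : List Bool) (m : Nat) (hm : m + 1 < cs.length)
    (ha : a.getD (m + 1) false = pvB cs (m + 1)) :
    pvStep cs a (m : Int) = (if pvB cs m then a.set m true else a) := by
  have g1 : PySem.List.pyGetD cs (m : Int) ' ' = cs[m]'(by omega) := by
    rw [PySem.List.pyGetD_natCast, List.getD_eq_getElem cs ' ' (by omega)]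
  have g2 : PySem.List.pyGetD cs ((m : Int) + 1) ' ' = cs[m + 1]'hm := by
    have : ((m : Int) + 1) = ((m + 1 : Nat) : Int) := by push_cast; ring
    rw [this, PySem.List.pyGetD_natCast, List.getD_eq_getElem cs ' ' hm]
  have g3 : PySem.List.pyGetD a ((m : Int) + 1) false = pvB cs (m + 1) := by
    have : ((m : Int) + 1) = ((m + 1 : Nat) : Int) := by push_cast; ring
    rw [this, PySem.List.pyGetD_natCast]; exact ha
  unfold pvStep
  rw [g1, g2, g3]
  rcases lt_trichotomy (cs[m]'(by omega)) (cs[m + 1]'hm) with h | h | h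
  · rw [pvB_cons cs m hm]
    simp [h, Int.toNat_natCast]
  · rw [pvB_cons cs m hm]
    simp [h, Int.toNat_natCast]
  · rw [pvB_cons cs m hm]
    simp [not_lt_of_gt h, h, ne_of_gt h]

theorem getD_set_ne (a : List Bool) (m j : Nat) (v : Bool) (hne : j ≠ m)
    (hj : j < a.length) : (a.set m v).getD j false = a.getD j false := by
  rw [List.getD_eq_getElem _ _ (by simpa using hj), List.getElem_set_ne (by omega),
      List.getD_eq_getElem _ _ hj]

theorem getD_set_self (a : List Bool) (m : Nat) (v : Bool) (hm : m < a.length) :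
    (a.set m v).getD m false = v := by
  rw [List.getD_eq_getElem _ _ (by simpa using hm), List.getElem_set_self]

theorem loop_inv (cs : List Char) : ∀ (m : Nat) (arr : List Bool),
    arr.length = cs.length + 1 →
    m < cs.length →
    (∀ k, k < m → arr.getD k false = false) →
    (∀ k, m ≤ k → k < cs.length → arr.getD k false = pvB cs k) →
    arr.getD cs.length false = true →
    ∀ k, k ≤ cs.length →
      ((PySem.List.pyRange ((m : Int) - 1) (-1) (-1)).foldl (pvStep cs) arr).getD k false
        = (if k = cs.length then true else pvB cs k) := by
  intro m
  induction m with
  | zero =>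
    intro arr hlen hm hlow hhigh htop k hk
    rw [show ((0 : Nat) : Int) - 1 = -1 by norm_num,
        PySem.List.pyRange_neg_one_eq_nil le_rfl]
    simp only [List.foldl]
    rcases Nat.lt_or_ge k cs.length with h | h
    · rw [if_neg (by omega)]; exact hhigh k (Nat.zero_le k) h
    · have : k = cs.length := by omega
      rw [if_pos this, this]; exact htop
  | succ m ih =>
    intro arr hlen hm hlow hhigh htop k hk
    have hpeel : PySem.List.pyRange (((m + 1 : Nat) : Int) - 1) (-1) (-1)
        = (m : Int) :: PySem.List.pyRange ((m : Int) - 1) (-1) (-1) := by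
      have : (((m + 1 : Nat) : Int) - 1) = (m : Int) := by push_cast; ring
      rw [this, PySem.List.pyRange_neg_one_cons (by omega)]
    rw [hpeel]
    simp only [List.foldl]
    have hstep : pvStep cs arr (m : Int) = (if pvB cs m then arr.set m true else arr) :=
      pvStep_eq cs arr m hm (hhigh (m + 1) (by omega) hm)
    have h2len : (pvStep cs arr (m : Int)).length = cs.length + 1 := by
      rw [length_pvStep, hlen]
    have h2low : ∀ k, k < m → (pvStep cs arr (m : Int)).getD k false = false := by
      intro j hj
      rw [hstep]
      split
      · rw [getD_set_ne arr m j true (by omega) (by omega)]; exact hlow j (by omega)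
      · exact hlow j (by omega)
    have h2high : ∀ k, m ≤ k → k < cs.length →
        (pvStep cs arr (m : Int)).getD k false = pvB cs k := by
      intro j hj hjlt
      rcases Nat.eq_or_lt_of_le hj with he | hlt
      · subst he
        rw [hstep]
        split
        · rename_i hb
          rw [getD_set_self arr m true (by omega)]; exact hb.symm
        · rename_i hb
          rw [hlow m (by omega)]
          exact (Bool.not_eq_true _).mp hb |>.symm
      · rw [hstep]
        split
        · rw [getD_set_ne arr m j true (by omega) (by omega)]; exact hhigh j (by omega) hjlt
        · exact hhigh j (by omega) hjlt
    have h2top : (pvStep cs arr (m : Int)).getD cs.length false = true := by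
      rw [hstep]
      split
      · rw [getD_set_ne arr m cs.length true (by omega) (by omega)]; exact htop
      · exact htop
    exact ih (pvStep cs arr (m : Int)) h2len (by omega) h2low h2high h2top k hk

theorem pvAlt_getD (cs : List Char) (k : Nat) (hk : k ≤ cs.length) :
    ((List.range cs.length).map (fun i => pvLexLt (cs.drop i) (cs.drop (i + 1))) ++ [true]).getD k false
      = (if k = cs.length then true else pvB cs k) := by
  rcases Nat.lt_or_ge k cs.length with h | h
  · rw [List.getD_eq_getElem _ false (by simp; omega),
        List.getElem_append_left (by simpa using h)]
    rw [if_neg (by omega)]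
    simp [pvB]
  · have hke : k = cs.length := by omega
    subst hke
    rw [List.getD_eq_getElem _ false (by simp),
        List.getElem_append_right (by simp)]
    simp

-- ===== VERDICT (by name: the statement is the Claim_ definition above) =====
theorem build_type_map_spec : Claim_equal_build_type_map := by
  intro string _
  unfold Spec_build_type_map build_type_map build_type_map_alt
  by_cases h0 : string.toList.length = 0
  · rw [List.length_eq_zero_iff.mp h0]
    rfl
  · have hn : 1 ≤ string.toList.length := by omega
    simp only [List.length_replicate, if_neg h0]
    set cs := string.toList with hcs
    set n := cs.length with hn'
    have harr0 : ∀ k, k < n → ((List.replicate (n + 1) false).set (n + 1 - 1) true).getD k false = false := by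
      intro k hkn
      rw [show n + 1 - 1 = n from rfl,
          getD_set_ne (List.replicate (n + 1) false) n k true (by omega) (by simp; omega),
          List.getD_eq_getElem _ false (by simp; omega), List.getElem_replicate]
    have hfold : ∀ k, k ≤ n →
        ((PySem.List.pyRange (((n - 1 : Nat) : Int) - 1) (-1) (-1)).foldl (pvStep cs)
          ((List.replicate (n + 1) false).set (n + 1 - 1) true)).getD k false
          = (if k = n then true else pvB cs k) := by
      apply loop_inv cs (n - 1) ((List.replicate (n + 1) false).set (n + 1 - 1) true)
      · simp; omega
      · omega
      · intro k hk; exact harr0 k (by omega)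
      · intro k hk1 hk2
        have hke : k = n - 1 := by omega
        rw [harr0 k hk2, hke, pvB_last cs (by omega)]
      · rw [show n + 1 - 1 = n from rfl,
            getD_set_self (List.replicate (n + 1) false) n true (by simp)]
    have hcast : ((n : Int) - 2) = (((n - 1 : Nat) : Int) - 1) := by omega
    rw [hcast]
    apply List.ext_getElem
    · rw [length_foldl_pvStep]; simp
    · intro k hk1 hk2
      have hkn : k ≤ n := by
        rw [length_foldl_pvStep] at hk1; simp at hk1; omega
      rw [← List.getD_eq_getElem _ false hk1, ← List.getD_eq_getElem _ false hk2,
          hfold k hkn, pvAlt_getD cs k hkn]
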